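-- pv_equiv track=rewrite | github.com/HEP-KBFI/ml-training | python/HH_parameter_reader.py | load_era_keys
-- ===== SOURCE A (Python) =====
-- def load_era_keys(keys):
--     samples = keys.keys()
--     era_wise_keys = {'keys16': [], 'keys17': [], 'keys18': []}
--     for sample in samples:
--         included_eras = keys[sample]
--         if 16 in included_eras:
--             era_wise_keys['keys16'].append(sample)
--         if 17 in included_eras:
--             era_wise_keys['keys17'].append(sample)
--         if 18 in included_eras:
--             era_wise_keys['keys18'].append(sample)
--     return era_wise_keys
-- ===== SOURCE B (Python) =====
-- def load_era_keys(keys):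
--     return {'keys%d' % e: [s for s in keys if e in keys[s]] for e in (16, 17, 18)}
-- ===== Notes on version B (the rewrite author's own statement) =====
-- stated objective: idiomatic
-- what changed: B builds the result era-major as a single dict comprehension, one filtering pass of the samples per fixed era, instead of A's sample-major loop appending into three pre-initialised dict lists.
import Mathlib
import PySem

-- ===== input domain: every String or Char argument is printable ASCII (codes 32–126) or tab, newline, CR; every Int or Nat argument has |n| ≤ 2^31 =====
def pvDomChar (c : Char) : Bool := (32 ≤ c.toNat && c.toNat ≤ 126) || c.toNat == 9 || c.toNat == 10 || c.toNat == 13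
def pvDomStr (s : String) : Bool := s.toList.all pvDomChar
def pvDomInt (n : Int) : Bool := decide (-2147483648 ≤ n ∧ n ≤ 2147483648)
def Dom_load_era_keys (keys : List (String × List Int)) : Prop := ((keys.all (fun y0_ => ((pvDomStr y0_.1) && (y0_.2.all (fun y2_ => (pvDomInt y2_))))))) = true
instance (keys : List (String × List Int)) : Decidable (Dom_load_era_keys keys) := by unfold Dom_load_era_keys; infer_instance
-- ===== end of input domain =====

-- B groups era-major (one filter pass per era) instead of A's single sample-major pass
-- appending into three dict lists; objective: more idiomatic, same exact output.

-- ===== PORT A =====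
-- keys[sample]: first-match lookup in the dict (sample always present, so the default is never used)
def pvLookup (keys : List (String × List Int)) (s : String) : List Int :=
  (PySem.Dict.mk keys).getD s []

-- the body of A's for-loop: three independent membership tests, each appending sample
def pvStep (keys : List (String × List Int)) (d : PySem.Dict String (List String))
    (sample : String) : PySem.Dict String (List String) :=
  let included_eras := pvLookup keys sample
  let d := if (16 : Int) ∈ included_eras then d.modify "keys16" [] (· ++ [sample]) else d
  let d := if (17 : Int) ∈ included_eras then d.modify "keys17" [] (· ++ [sample]) else d
  if (18 : Int) ∈ included_eras then d.modify "keys18" [] (· ++ [sample]) else d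

def load_era_keys (keys : List (String × List Int)) : List (String × List String) :=
  let samples := keys.map Prod.fst
  let era_wise_keys : PySem.Dict String (List String) :=
    PySem.Dict.mk [("keys16", []), ("keys17", []), ("keys18", [])]
  (samples.foldl (pvStep keys) era_wise_keys).items

-- ===== PORT B =====
def load_era_keys_alt (keys : List (String × List Int)) : List (String × List String) :=
  [(16 : Int), 17, 18].map (fun e =>
    ("keys" ++ PySem.Int.toStr e,
     (keys.map Prod.fst).filter (fun s => decide (e ∈ (PySem.Dict.mk keys).getD s []))))

-- ===== PRECONDITION & SPEC =====
def Spec_load_era_keys (keys : List (String × List Int)) (out : List (String × List String)) : Prop := out = load_era_keys_alt keys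
instance (keys : List (String × List Int)) (out : List (String × List String)) : Decidable (Spec_load_era_keys keys out) := by unfold Spec_load_era_keys; infer_instance

-- ===== CLAIM (what is proved, stated in full; the proofs are below) =====
def Claim_equal_load_era_keys : Prop := ∀ (keys : List (String × List Int)), Dom_load_era_keys keys → Spec_load_era_keys keys (load_era_keys keys)

-- ===== LEMMAS AND PROOFS =====

-- loop invariant for A's fold: the dict always has exactly the three era keys, and each
-- value is the initial list extended by the samples of the suffix whose eras include it
theorem pvStep_mk (keys : List (String × List Int)) (s : String) (a b c : List String) :
    pvStep keys (PySem.Dict.mk [("keys16", a), ("keys17", b), ("keys18", c)]) s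
      = PySem.Dict.mk
          [("keys16", a ++ if (16 : Int) ∈ pvLookup keys s then [s] else []),
           ("keys17", b ++ if (17 : Int) ∈ pvLookup keys s then [s] else []),
           ("keys18", c ++ if (18 : Int) ∈ pvLookup keys s then [s] else [])] := by
  by_cases h16 : (16 : Int) ∈ pvLookup keys s <;>
    by_cases h17 : (17 : Int) ∈ pvLookup keys s <;>
      by_cases h18 : (18 : Int) ∈ pvLookup keys s <;>
        simp [pvStep, h16, h17, h18, PySem.Dict.modify, PySem.Dict.insert,
              PySem.Dict.getD, PySem.Dict.get?, PySem.Dict.contains]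

theorem pvStep_foldl (keys : List (String × List Int)) (ss : List String)
    (a b c : List String) :
    ss.foldl (pvStep keys) (PySem.Dict.mk [("keys16", a), ("keys17", b), ("keys18", c)])
      = PySem.Dict.mk
          [("keys16", a ++ ss.filter (fun s => decide ((16 : Int) ∈ pvLookup keys s))),
           ("keys17", b ++ ss.filter (fun s => decide ((17 : Int) ∈ pvLookup keys s))),
           ("keys18", c ++ ss.filter (fun s => decide ((18 : Int) ∈ pvLookup keys s)))] := by
  induction ss generalizing a b c with
  | nil => simp
  | cons s t ih =>
    simp only [List.foldl_cons, pvStep_mk, ih, List.filter_cons]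
    split_ifs <;> simp_all

theorem load_era_keys_eq (keys : List (String × List Int)) :
    load_era_keys keys = load_era_keys_alt keys := by
  have h16 : "keys" ++ PySem.Int.toStr 16 = "keys16" := by decide
  have h17 : "keys" ++ PySem.Int.toStr 17 = "keys17" := by decide
  have h18 : "keys" ++ PySem.Int.toStr 18 = "keys18" := by decide
  show ((keys.map Prod.fst).foldl (pvStep keys)
      (PySem.Dict.mk [("keys16", []), ("keys17", []), ("keys18", [])])).items
    = load_era_keys_alt keys
  rw [pvStep_foldl]
  simp [load_era_keys_alt, pvLookup, h16, h17, h18]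
  exact ⟨rfl, rfl, rfl⟩

-- ===== VERDICT (by name: the statement is the Claim_ definition above) =====
theorem load_era_keys_spec : Claim_equal_load_era_keys := by
  intro keys _
  unfold Spec_load_era_keys
  exact load_era_keys_eq keys
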